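-- pv_equiv track=rewrite | github.com/kd02109/CodingTest | SWEA/D3/15612. 체스판 위의 룩 배치/체스판 위의 룩 배치.py | solution
-- ===== SOURCE A (Python) =====
-- def solution(board):
--     # 열을 확인하기 위한 용도
--     column = [0] * 8
--
--     # 룩이 같은 열이나 같은 행에 있는지 확인
--     for i in range(8):
--         # 한줄에 여러개 있거나, 아무것도 없으면 안되는거
--         if board[i].count('O') > 1 or board[i].count('O') == 0:
--             return 'no'
--         # 열을 검사하자.
--         for j in range(0, 8):
--             # 이미 같은 열에 룩이 있으면 안됨
--             if board[i][j] == 'O' and column[j]: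
--                 return 'no'
--             # 같은 열에 룩이 없으니까 pass
--             elif board[i][j] == 'O' and not column[j]:
--                 column[j] = 1
--     return 'yes'
-- ===== SOURCE B (Python) =====
-- def solution(board):
--     cols = []
--     for i in range(8):
--         row = board[i]
--         if row.count('O') != 1:
--             return 'no'
--         cols.append(row.index('O'))
--     return 'yes' if len(set(cols)) == 8 else 'no'
-- ===== Notes on version B (the rewrite author's own statement) =====
-- stated objective: simpler
-- what changed: A maintains a per-column flag array and checks conflicts inline while scanning all 64 cells; B gathers each row's single rook column with count/index and decides by set-distinctness of the 8 column indices at the end.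
-- outside the precondition, e.g. on solution(['O.......', '........']): A returns 'no', B returns 'no'
import Mathlib
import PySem

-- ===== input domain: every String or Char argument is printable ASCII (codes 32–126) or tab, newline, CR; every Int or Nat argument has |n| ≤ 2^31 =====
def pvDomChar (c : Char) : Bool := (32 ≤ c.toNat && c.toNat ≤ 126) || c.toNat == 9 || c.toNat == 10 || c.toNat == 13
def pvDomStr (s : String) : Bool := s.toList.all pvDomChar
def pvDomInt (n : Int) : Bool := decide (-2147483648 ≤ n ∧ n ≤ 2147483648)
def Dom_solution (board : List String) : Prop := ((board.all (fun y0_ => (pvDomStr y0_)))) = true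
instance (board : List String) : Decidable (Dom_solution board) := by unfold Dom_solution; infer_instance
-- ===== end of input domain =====

-- B replaces A's per-column flag array and inline conflict check by gathering the rook
-- column of each row and testing set-distinctness at the end (simpler two-phase decomposition).
-- Return-value equivalence is proved on genuine boards (≥ 8 rows, first 8 rows of length 8).

-- ===== PORT A =====
-- inner 'for j in range(0, 8)' loop: returns none where Python does 'return "no"',
-- some col' where the loop falls through with updated column flags
def solutionInner (row : List Char) : List Nat → List Int → Option (List Int)
  | [], col => some col
  | j :: js, col =>
    if row.getD j ' ' = 'O' ∧ col.getD j 0 ≠ 0 then none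
    else if row.getD j ' ' = 'O' ∧ col.getD j 0 = 0 then solutionInner row js (col.set j 1)
    else solutionInner row js col

-- outer 'for i in range(8)' loop (board[i].count('O') for the single char 'O' is char count)
def solutionRows (board : List String) : List Nat → List Int → String
  | [], _ => "yes"
  | i :: is, col =>
    let row := (board.getD i "").toList
    if row.count 'O' > 1 ∨ row.count 'O' = 0 then "no"
    else match solutionInner row (List.range 8) col with
      | none => "no"
      | some col' => solutionRows board is col'

def solution (board : List String) : String :=
  solutionRows board (List.range 8) (List.replicate 8 0)

-- ===== PORT B =====
-- gather phase: one column index per row, none where Python does 'return "no"';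
-- row.index('O') is List.idxOf (exact here: the count-guard guarantees 'O' is present)
def solutionGather (board : List String) : List Nat → List Nat → Option (List Nat)
  | [], cols => some cols
  | i :: is, cols =>
    let row := (board.getD i "").toList
    if row.count 'O' ≠ 1 then none
    else solutionGather board is (cols ++ [row.idxOf 'O'])

def solution_alt (board : List String) : String :=
  match solutionGather board (List.range 8) [] with
  | none => "no"
  | some cols => if (PySem.Set.ofList cols).length = 8 then "yes" else "no"

-- ===== PRECONDITION & SPEC =====
-- Pre_ admits genuine 8x8 boards plus every board whose first row already fails the
-- exactly-one-rook test (both programs answer 'no' there at once).  Other degenerate boards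
-- are excluded: with fewer than 8 rows or a short row A usually raises IndexError at
-- board[i][j] mid-scan (only a data-dependent early 'no' avoids it), and on rows longer
-- than 8 a rook beyond column 7 is invisible to A's fixed 8-column flag scan.
def Pre_solution (board : List String) : Prop :=
  (8 ≤ board.length ∧ ∀ s ∈ board.take 8, s.toList.length = 8) ∨
  (board ≠ [] ∧ (board.getD 0 "").toList.count 'O' ≠ 1)
instance (board : List String) : Decidable (Pre_solution board) := by unfold Pre_solution; infer_instance

def pvWitness_solution : List String :=
  ["O.......", ".O......", "..O.....", "...O....", "....O...", ".....O..", "......O.", ".......O"]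

def Spec_solution (board : List String) (out : String) : Prop := out = solution_alt board
instance (board : List String) (out : String) : Decidable (Spec_solution board out) := by unfold Spec_solution; infer_instance

-- ===== CLAIM (what is proved, stated in full; the proofs are below) =====
def Claim_equal_solution : Prop := ∀ (board : List String), Dom_solution board → Pre_solution board → Spec_solution board (solution board)

-- ===== LEMMAS AND PROOFS =====

-- two distinct positions holding the same char force count ≥ 2
theorem pv_two_le_count {l : List Char} {a : Char} {i j : Nat} (hi : i < l.length)
    (hj : j < l.length) (hij : i < j) (h1 : l[i] = a) (h2 : l[j] = a) : 2 ≤ l.count a := by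
  have : l.Duplicate a := List.duplicate_iff_exists_distinct_get.mpr ⟨⟨i, hi⟩, ⟨j, hj⟩, hij, by simp [h1, h2]⟩
  exact List.duplicate_iff_two_le_count.mp this

-- in a row with exactly one 'O' every position other than idxOf 'O' is not 'O'
theorem pv_unique_pos {row : List Char} (h1 : row.count 'O' = 1) {j : Nat}
    (hj : j < row.length) (hne : j ≠ row.idxOf 'O') : row[j] ≠ 'O' := by
  have hmem : 'O' ∈ row := List.count_pos_iff.mp (by omega)
  have hp : row.idxOf 'O' < row.length := List.idxOf_lt_length_of_mem hmem
  have hpO : row[row.idxOf 'O'] = 'O' := List.getElem_idxOf hp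
  intro hO
  rcases Nat.lt_or_ge j (row.idxOf 'O') with h | h
  · have := pv_two_le_count hj hp h hO hpO; omega
  · have hlt : row.idxOf 'O' < j := lt_of_le_of_ne h (fun e => hne e.symm)
    have := pv_two_le_count hp hj hlt hpO hO; omega

-- solutionInner over a run of indices containing no 'O' position is the identity
theorem pv_inner_skip {row : List Char} : ∀ (js : List Nat) (col : List Int),
    (∀ j ∈ js, row.getD j ' ' ≠ 'O') → solutionInner row js col = some col := by
  intro js
  induction js with
  | nil => intro col _; rfl
  | cons j js ih =>
    intro col h
    have hj := h j (by simp)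
    simp only [solutionInner]
    rw [if_neg (by tauto), if_neg (by tauto)]
    exact ih col (fun x hx => h x (by simp [hx]))

-- characterisation of the inner loop on a row with a unique 'O' at position p
theorem pv_inner_char {row : List Char} {p : Nat} : ∀ (js : List Nat) (col : List Int),
    js.Nodup → p ∈ js →
    (∀ j ∈ js, j ≠ p → row.getD j ' ' ≠ 'O') →
    row.getD p ' ' = 'O' →
    solutionInner row js col = if col.getD p 0 ≠ 0 then none else some (col.set p 1) := by
  intro js
  induction js with
  | nil => intro col _ hp; simp at hp
  | cons j js ih =>
    intro col hnd hp hothers hO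
    by_cases hjp : j = p
    · subst hjp
      have hnotin : j ∉ js := (List.nodup_cons.mp hnd).1
      simp only [solutionInner]
      by_cases hc : col.getD j 0 ≠ 0
      · rw [if_pos ⟨hO, hc⟩, if_pos hc]
      · rw [if_neg (by tauto), if_pos ⟨hO, by tauto⟩, if_neg hc]
        exact pv_inner_skip js _ (fun x hx => hothers x (by simp [hx]) (fun e => hnotin (e ▸ hx)))
    · have hpj : p ∈ js := by
        cases List.mem_cons.mp hp with
        | inl h => exact absurd h.symm hjp
        | inr h => exact h
      have hjO : row.getD j ' ' ≠ 'O' := hothers j (by simp) hjp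
      simp only [solutionInner]
      rw [if_neg (by tauto), if_neg (by tauto)]
      exact ih col (List.nodup_cons.mp hnd).2 hpj (fun x hx => hothers x (by simp [hx])) hO

-- shape of the gather loop's successful result
theorem pv_gather_shape (board : List String) : ∀ (is : List Nat) (acc cols : List Nat),
    solutionGather board is acc = some cols → ∃ t, cols = acc ++ t ∧ t.length = is.length := by
  intro is
  induction is with
  | nil => intro acc cols h; exact ⟨[], by simpa [solutionGather] using h.symm, rfl⟩
  | cons i is ih =>
    intro acc cols h
    simp only [solutionGather] at h
    split at h
    · exact absurd h (by simp)
    · obtain ⟨t, ht, hl⟩ := ih _ _ h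
      refine ⟨(board.getD i "").toList.idxOf 'O' :: t, ?_, by simp [hl]⟩
      rw [ht]; simp

-- foldl over Set.add grows length by at most the number of elements folded in
theorem pv_foldl_add_le {α : Type} [BEq α] [LawfulBEq α] : ∀ (l s : List α),
    (l.foldl PySem.Set.add s).length ≤ s.length + l.length := by
  intro l
  induction l with
  | nil => simp
  | cons x l ih =>
    intro s
    have h1 : (PySem.Set.add s x).length ≤ s.length + 1 := by
      simp only [PySem.Set.add]; split <;> simp
    calc ((x :: l).foldl PySem.Set.add s).length = (l.foldl PySem.Set.add (PySem.Set.add s x)).length := rfl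
      _ ≤ (PySem.Set.add s x).length + l.length := ih _
      _ ≤ s.length + (l.length + 1) := by omega

-- folding a list that revisits an element of s is strictly shorter than s.length + l.length
theorem pv_foldl_add_lt_of_mem {α : Type} [BEq α] [LawfulBEq α] : ∀ (l s : List α) (x : α),
    x ∈ l → x ∈ s → (l.foldl PySem.Set.add s).length < s.length + l.length := by
  intro l
  induction l with
  | nil => intro s x h; simp at h
  | cons y l ih =>
    intro s x hxl hxs
    rcases List.mem_cons.mp hxl with h | h
    · subst h
      have hadd : PySem.Set.add s x = s := by
        simp only [PySem.Set.add, PySem.Set.contains]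
        rw [if_pos (by simpa using hxs)]
      calc ((x :: l).foldl PySem.Set.add s).length = (l.foldl PySem.Set.add s).length := by
              simp only [List.foldl_cons, hadd]
        _ ≤ s.length + l.length := pv_foldl_add_le l s
        _ < s.length + (l.length + 1) := by omega
    · have hxs' : x ∈ PySem.Set.add s y := by
        simp only [PySem.Set.add]; split <;> simp [hxs]
      have h1 : (PySem.Set.add s y).length ≤ s.length + 1 := by
        simp only [PySem.Set.add]; split <;> simp
      calc ((y :: l).foldl PySem.Set.add s).length = (l.foldl PySem.Set.add (PySem.Set.add s y)).length := rfl
        _ < (PySem.Set.add s y).length + l.length := ih _ x h hxs'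
        _ ≤ s.length + (l.length + 1) := by omega

-- x is always a member of Set.add s x
theorem pv_mem_add {α : Type} [BEq α] [LawfulBEq α] (s : List α) (x : α) :
    x ∈ PySem.Set.add s x := by
  simp only [PySem.Set.add, PySem.Set.contains]
  split
  · next h => simpa using h
  · simp

-- folding a non-nodup list strictly loses length
theorem pv_foldl_add_lt {α : Type} [BEq α] [LawfulBEq α] : ∀ (l s : List α),
    ¬ l.Nodup → (l.foldl PySem.Set.add s).length < s.length + l.length := by
  intro l
  induction l with
  | nil => intro s h; simp at h
  | cons x t ih =>
    intro s h
    have h1 : (PySem.Set.add s x).length ≤ s.length + 1 := by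
      simp only [PySem.Set.add]; split <;> simp
    by_cases hx : x ∈ t
    · calc ((x :: t).foldl PySem.Set.add s).length
          = (t.foldl PySem.Set.add (PySem.Set.add s x)).length := rfl
        _ < (PySem.Set.add s x).length + t.length :=
            pv_foldl_add_lt_of_mem t _ x hx (pv_mem_add s x)
        _ ≤ s.length + (t.length + 1) := by omega
    · have ht : ¬ t.Nodup := fun hn => h (List.nodup_cons.mpr ⟨hx, hn⟩)
      calc ((x :: t).foldl PySem.Set.add s).length
          = (t.foldl PySem.Set.add (PySem.Set.add s x)).length := rfl
        _ < (PySem.Set.add s x).length + t.length := ih _ ht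
        _ ≤ s.length + (t.length + 1) := by omega

-- a list with a duplicate dedups to something strictly shorter
theorem pv_ofList_lt_of_not_nodup {l : List Nat} (h : ¬ l.Nodup) :
    (PySem.Set.ofList l).length < l.length := by
  rw [PySem.Set.ofList_eq_foldl]
  simpa using pv_foldl_add_lt l [] h

-- folding a nodup list of fresh elements appends it
theorem pv_foldl_add_fresh {α : Type} [BEq α] [LawfulBEq α] : ∀ (l s : List α),
    l.Nodup → (∀ x ∈ l, x ∉ s) → l.foldl PySem.Set.add s = s ++ l := by
  intro l
  induction l with
  | nil => intro s _ _; simp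
  | cons x t ih =>
    intro s hnd hf
    have hxs : x ∉ s := hf x (by simp)
    have hadd : PySem.Set.add s x = s ++ [x] := by
      simp only [PySem.Set.add, PySem.Set.contains]
      rw [if_neg (by simpa using hxs)]
    have := ih (s ++ [x]) (List.nodup_cons.mp hnd).2 (fun y hy => by
      intro hmem
      rcases List.mem_append.mp hmem with h | h
      · exact hf y (by simp [hy]) h
      · exact (List.nodup_cons.mp hnd).1 (by simpa [List.mem_singleton.mp h] using hy))
    simp only [List.foldl_cons, hadd, this, List.append_assoc, List.singleton_append]

-- dedup of a nodup list is itself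
theorem pv_ofList_nodup {l : List Nat} (h : l.Nodup) : PySem.Set.ofList l = l := by
  rw [PySem.Set.ofList_eq_foldl]
  simpa using pv_foldl_add_fresh l [] h (by simp)

-- shorthand for B's post-gather decision
def pvFinish (board : List String) (is : List Nat) (acc : List Nat) : String :=
  match solutionGather board is acc with
  | none => "no"
  | some cols => if (PySem.Set.ofList cols).length = 8 then "yes" else "no"

-- a gather run started from a non-nodup accumulator can never answer "yes"
theorem pv_finish_dup (board : List String) (is : List Nat) (acc : List Nat)
    (hlen : acc.length + is.length = 8) (hdup : ¬ acc.Nodup) :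
    pvFinish board is acc = "no" := by
  unfold pvFinish
  cases hg : solutionGather board is acc with
  | none => rfl
  | some cols =>
    obtain ⟨t, ht, hl⟩ := pv_gather_shape board is acc cols hg
    have hcolsdup : ¬ cols.Nodup := fun hn => hdup ((List.nodup_append.mp (ht ▸ hn)).1)
    have hclen : cols.length = 8 := by rw [ht]; simp [hl]; omega
    have := pv_ofList_lt_of_not_nodup hcolsdup
    show (if (PySem.Set.ofList cols).length = 8 then "yes" else "no") = "no"
    rw [if_neg (by omega)]

-- main simulation invariant: A's flag array mirrors B's accumulated column list
theorem pv_main (board : List String) : ∀ (is : List Nat) (col : List Int) (acc : List Nat),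
    (∀ i ∈ is, (board.getD i "").toList.length = 8) →
    col.length = 8 →
    acc.length + is.length = 8 →
    (∀ j, j ∈ acc ↔ col.getD j 0 ≠ 0) →
    acc.Nodup →
    solutionRows board is col = pvFinish board is acc := by
  intro is
  induction is with
  | nil =>
    intro col acc _ _ hlen hmem hnd
    have hacc : acc.length = 8 := by simpa using hlen
    simp [solutionRows, pvFinish, solutionGather, pv_ofList_nodup hnd, hacc]
  | cons i is ih =>
    intro col acc hrows hcol hlen hmem hnd
    set row := (board.getD i "").toList with hrow
    have hrlen : row.length = 8 := hrows i (by simp)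
    simp only [solutionRows, pvFinish, solutionGather, ← hrow]
    by_cases hcnt : row.count 'O' = 1
    · rw [if_neg (by omega), if_neg (by omega)]
      set p := row.idxOf 'O' with hp
      have hmemO : 'O' ∈ row := List.count_pos_iff.mp (by omega)
      have hplt : p < row.length := List.idxOf_lt_length_of_mem hmemO
      have hpO : row.getD p ' ' = 'O' := by
        rw [List.getD_eq_getElem _ _ hplt]; exact List.getElem_idxOf hplt
      have hinner := pv_inner_char (row := row) (p := p) (List.range 8) col
        (List.nodup_range) (by simp [List.mem_range]; omega)
        (fun j hj hjp => by
          rw [List.getD_eq_getElem _ _ (by simp [hrlen, List.mem_range.mp hj])]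
          exact pv_unique_pos hcnt (by simp [hrlen, List.mem_range.mp hj]) hjp)
        hpO
      rw [hinner]
      by_cases hflag : col.getD p 0 ≠ 0
      · rw [if_pos hflag]
        have hpin : p ∈ acc := (hmem p).mpr hflag
        have hdup : ¬ (acc ++ [p]).Nodup := fun hn =>
          (List.nodup_append.mp hn).2.2 p hpin p (by simp) rfl
        have hfin := pv_finish_dup board is (acc ++ [p]) (by simp at hlen ⊢; omega) hdup
        unfold pvFinish at hfin
        exact hfin.symm
      · rw [if_neg hflag]
        rw [not_not] at hflag
        have hpnot : p ∉ acc := fun h => (hmem p).mp h hflag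
        have hIH := ih (col.set p 1) (acc ++ [p])
          (fun x hx => hrows x (by simp [hx]))
          (by simp [hcol])
          (by simp at hlen ⊢; omega)
          (fun j => by
            by_cases hjp : j = p
            · subst hjp
              have hlt : p < (col.set p 1).length := by simp [hcol]; omega
              rw [List.getD_eq_getElem _ _ hlt, List.getElem_set_self (by simpa [hcol] using hlt)]
              simp
            · constructor
              · intro hj
                rcases List.mem_append.mp hj with h | h
                · have hv := (hmem j).mp h
                  by_cases hjl : j < col.length
                  · rw [List.getD_eq_getElem _ _ hjl] at hv
                    rw [List.getD_eq_getElem _ _ (by simpa using hjl),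
                      List.getElem_set_ne (by omega)]
                    exact hv
                  · rw [List.getD_eq_default _ _ (by omega)] at hv
                    simp at hv
                · exact absurd (List.mem_singleton.mp h) hjp
              · intro hj
                by_cases hjl : j < col.length
                · rw [List.getD_eq_getElem _ _ (by simpa using hjl),
                    List.getElem_set_ne (by omega)] at hj
                  exact List.mem_append.mpr (Or.inl ((hmem j).mpr (by
                    rwa [List.getD_eq_getElem _ _ hjl])))
                · rw [List.getD_eq_default _ _ (by simp; omega)] at hj
                  simp at hj)
          (by
            rw [List.nodup_append]
            exact ⟨hnd, List.nodup_singleton p, fun a ha b hb => by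
              simp at hb; subst hb; exact fun e => hpnot (e ▸ ha)⟩)
        unfold pvFinish at hIH
        exact hIH
    · by_cases h0 : row.count 'O' = 0
      · rw [if_pos (Or.inr h0), if_pos (by omega)]
      · rw [if_pos (Or.inl (by omega)), if_pos (by omega)]

-- ===== VERDICT (by name: the statement is the Claim_ definition above) =====
theorem solution_spec : Claim_equal_solution := by
  intro board _ hpre
  rcases hpre with ⟨hblen, hrows⟩ | ⟨-, h0⟩
  case inr =>
    unfold Spec_solution solution solution_alt
    have hr : List.range 8 = [0, 1, 2, 3, 4, 5, 6, 7] := rfl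
    rw [hr]
    simp only [solutionRows, solutionGather]
    rw [if_pos (by omega), if_pos (by omega)]
  unfold Spec_solution solution solution_alt
  have h := pv_main board (List.range 8) (List.replicate 8 0) []
    (fun i hi => by
      have hi8 : i < 8 := List.mem_range.mp hi
      have : board.getD i "" ∈ board.take 8 := by
        rw [List.getD_eq_getElem _ _ (by omega)]
        exact List.mem_take_iff_getElem.mpr ⟨i, by omega, by simp⟩
      exact hrows _ this)
    (by simp) (by simp)
    (fun j => by
      constructor
      · intro h; simp at h
      · intro h
        exfalso; apply h
        rcases Nat.lt_or_ge j 8 with hj | hj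
        · rw [List.getD_eq_getElem _ _ (by simpa using hj)]
          interval_cases j <;> rfl
        · rw [List.getD_eq_default _ _ (by simpa using hj)])
    List.nodup_nil
  unfold pvFinish at h
  exact h
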